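-- pv_equiv track=rewrite | github.com/memo-ozdincer/CS180-gamification | gamify.py | calculate_hedons_textbooks
-- ===== SOURCE A (Python) =====
-- def calculate_hedons_textbooks(duration, is_tired, star_used):
--     """
--     Calculates the hedons gained or lost from reading textbooks.
--
--     Args:
--         duration (int): Duration of reading in minutes.
--         is_tired (bool): Whether the user is tired.
--         star_used (bool): Whether a star was used.
--
--     Returns:
--         int: Total hedons gained or lost.
--     """
--     hedons = 0
--     for minute in range(1, duration + 1):
--         hedon_per_minute = -2 if is_tired else (1 if minute <= 20 else -1)
--         if star_used and minute <= 10: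
--             hedon_per_minute += 3
--         hedons += hedon_per_minute
--
--     return hedons
-- ===== SOURCE B (Python) =====
-- def calculate_hedons_textbooks(duration, is_tired, star_used):
--     n = max(duration, 0)
--     if is_tired:
--         base = -2 * n
--     else:
--         base = min(n, 20) - max(n - 20, 0)
--     bonus = 3 * min(n, 10) if star_used else 0
--     return base + bonus
-- ===== Notes on version B (the rewrite author's own statement) =====
-- stated objective: faster
-- what changed: Replaced the per-minute summation loop with a closed-form piecewise formula using min/max over the 20-minute and 10-minute tier boundaries.
import Mathlib
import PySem

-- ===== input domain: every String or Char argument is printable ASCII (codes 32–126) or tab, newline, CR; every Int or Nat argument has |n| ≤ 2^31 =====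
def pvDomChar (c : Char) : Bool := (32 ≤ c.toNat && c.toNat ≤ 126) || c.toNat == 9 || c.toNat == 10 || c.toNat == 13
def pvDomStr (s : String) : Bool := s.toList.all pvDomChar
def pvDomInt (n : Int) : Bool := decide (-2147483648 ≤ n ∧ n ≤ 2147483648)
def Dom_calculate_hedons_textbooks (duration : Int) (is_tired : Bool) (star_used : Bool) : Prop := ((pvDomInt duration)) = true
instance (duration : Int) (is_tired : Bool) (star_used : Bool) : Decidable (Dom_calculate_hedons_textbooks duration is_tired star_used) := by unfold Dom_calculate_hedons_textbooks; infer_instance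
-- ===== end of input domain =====

-- B replaces A's per-minute loop by a closed-form piecewise min/max formula (O(1) instead of O(duration)).

-- ===== PORT A =====
def calculate_hedons_textbooks (duration : Int) (is_tired : Bool) (star_used : Bool) : Int :=
  (PySem.List.pyRange 1 (duration + 1) 1).foldl
    (fun hedons minute =>
      let hedon_per_minute : Int := if is_tired then -2 else (if minute ≤ 20 then 1 else -1)
      let hedon_per_minute := if star_used && decide (minute ≤ 10) then hedon_per_minute + 3 else hedon_per_minute
      hedons + hedon_per_minute) 0

-- ===== PORT B =====
def calculate_hedons_textbooks_alt (duration : Int) (is_tired : Bool) (star_used : Bool) : Int :=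
  let n := max duration 0
  let base := if is_tired then -2 * n else min n 20 - max (n - 20) 0
  let bonus := if star_used then 3 * min n 10 else 0
  base + bonus

-- ===== PRECONDITION & SPEC =====
def Spec_calculate_hedons_textbooks (duration : Int) (is_tired : Bool) (star_used : Bool) (out : Int) : Prop := out = calculate_hedons_textbooks_alt duration is_tired star_used
instance (duration : Int) (is_tired : Bool) (star_used : Bool) (out : Int) : Decidable (Spec_calculate_hedons_textbooks duration is_tired star_used out) := by unfold Spec_calculate_hedons_textbooks; infer_instance

-- ===== CLAIM (what is proved, stated in full; the proofs are below) =====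
def Claim_equal_calculate_hedons_textbooks : Prop := ∀ (duration : Int) (is_tired : Bool) (star_used : Bool), Dom_calculate_hedons_textbooks duration is_tired star_used → Spec_calculate_hedons_textbooks duration is_tired star_used (calculate_hedons_textbooks duration is_tired star_used)

-- ===== LEMMAS AND PROOFS =====

-- A on a nonnegative natural duration equals B's closed form, by peeling the last minute.
lemma hedons_nat (N : Nat) (is_tired star_used : Bool) :
    calculate_hedons_textbooks (N : Int) is_tired star_used
      = calculate_hedons_textbooks_alt (N : Int) is_tired star_used := by
  induction N with
  | zero =>
      simp [calculate_hedons_textbooks, calculate_hedons_textbooks_alt]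
  | succ n ih =>
      have h : ((n.succ : Int) + 1) = ((n : Int) + 1) + 1 := by push_cast; ring
      unfold calculate_hedons_textbooks at ih ⊢
      rw [h, PySem.List.pyRange_one_succ_right (by omega : (1:Int) ≤ (n : Int) + 1),
        List.foldl_append]
      rw [ih]
      unfold calculate_hedons_textbooks_alt
      simp only [List.foldl_cons, List.foldl_nil]
      rcases is_tired <;> rcases star_used <;> simp <;> (try split_ifs) <;> push_cast <;> omega

-- ===== VERDICT (by name: the statement is the Claim_ definition above) =====
theorem calculate_hedons_textbooks_spec : Claim_equal_calculate_hedons_textbooks := by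
  intro duration is_tired star_used _
  unfold Spec_calculate_hedons_textbooks
  by_cases hle : duration ≤ 0
  · unfold calculate_hedons_textbooks calculate_hedons_textbooks_alt
    rw [PySem.List.pyRange_one_eq_nil (by omega : duration + 1 ≤ 1)]
    rcases is_tired <;> rcases star_used <;> simp <;> omega
  · obtain ⟨N, rfl⟩ : ∃ N : Nat, duration = (N : Int) :=
      ⟨duration.toNat, (Int.toNat_of_nonneg (by omega)).symm⟩
    exact hedons_nat N is_tired star_used
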